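-- pv_equiv track=rewrite | github.com/openalea-incubator/lgrass | legume/ShootMorpho.py | ls_idvois_ordre1
-- ===== SOURCE A (Python) =====
-- def ls_idvois_ordre1(n, cote, nblignes):
--     """ pour une plante n, dans un dispocitif regulier arrange en colonnes croissantes de cote indiv"""
--     nbindiv = cote * nblignes
--     ls_defaut = [n - (cote + 1), n - cote, n - (cote - 1), n - 1, n + 1, n + (cote - 1), n + cote, n + (cote + 1)]
--
--     if n % cote == 0:  # bord haut
--         ls_defaut[0] = ls_defaut[0] + cote
--         ls_defaut[3] = ls_defaut[3] + cote
--         ls_defaut[5] = ls_defaut[5] + cote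
--
--     if (n + 1) % cote == 0:  # bord bas
--         ls_defaut[2] = ls_defaut[2] - cote
--         ls_defaut[4] = ls_defaut[4] - cote
--         ls_defaut[7] = ls_defaut[7] - cote
--
--     for i in range(len(ls_defaut)):
--         if ls_defaut[i] < 0:  # bord gauche
--             ls_defaut[i] = ls_defaut[i] + nbindiv
--
--         if ls_defaut[i] >= nbindiv:  # bord droit
--             ls_defaut[i] = ls_defaut[i] - nbindiv
--
--     return ls_defaut
-- ===== SOURCE B (Python) =====
-- def _wrap1(x, m):
--     """bring x back into [0, m) after a +/-1 step"""
--     if x < 0: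
--         return x + m
--     if x >= m:
--         return x - m
--     return x
--
--
-- def ls_idvois_ordre1(n, cote, nblignes):
--     """ pour une plante n, dans un dispocitif regulier arrange en colonnes croissantes de cote indiv"""
--     row = n % cote
--     col = n // cote
--     voisins = []
--     for dc in (-1, 0, 1):
--         for dr in (-1, 0, 1):
--             if dc == 0 and dr == 0:
--                 continue
--             voisins.append(_wrap1(col + dc, nblignes) * cote + _wrap1(row + dr, cote))
--     return voisins
-- ===== Notes on version B (the rewrite author's own statement) =====
-- stated objective: idiomatic
-- what changed: B decomposes n into (column, row) grid coordinates and loops over the eight offset pairs, wrapping each axis back into range separately, instead of A's literal offset list patched per border and then wrapped at the flat-index level.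
-- outside the precondition, e.g. on ls_idvois_ordre1(5, -2, 3): A returns [12, 13, 16, 10, 14, 8, 9, 12], B returns [-2, -1, 4, -4, 2, -6, -5, 0]
import Mathlib
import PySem

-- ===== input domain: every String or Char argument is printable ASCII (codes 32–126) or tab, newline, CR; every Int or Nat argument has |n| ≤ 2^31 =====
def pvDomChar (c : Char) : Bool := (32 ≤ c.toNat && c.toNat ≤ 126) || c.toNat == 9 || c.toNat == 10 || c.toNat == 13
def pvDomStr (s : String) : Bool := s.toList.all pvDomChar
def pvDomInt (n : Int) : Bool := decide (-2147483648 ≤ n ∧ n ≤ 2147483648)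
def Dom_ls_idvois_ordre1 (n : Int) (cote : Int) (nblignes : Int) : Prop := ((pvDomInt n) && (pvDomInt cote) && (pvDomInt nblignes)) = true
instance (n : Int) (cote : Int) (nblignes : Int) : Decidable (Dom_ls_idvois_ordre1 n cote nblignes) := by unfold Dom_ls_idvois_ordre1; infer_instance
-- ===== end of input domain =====

-- B decomposes n into (column,row) coordinates and wraps each axis separately after the ±1 step,
-- instead of A's patched offset list wrapped at the flat-index level (objective: idiomatic).


-- ===== PORT A =====
-- the body of A's for-loop over the 8 list slots (left/right border wrap of the flat index)
def pvWrapA (nbindiv v : Int) : Int :=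
  let v1 := if v < 0 then v + nbindiv else v
  if v1 ≥ nbindiv then v1 - nbindiv else v1

def ls_idvois_ordre1 (n : Int) (cote : Int) (nblignes : Int) : List Int :=
  let nbindiv := cote * nblignes
  let l0 := n - (cote + 1); let l1 := n - cote; let l2 := n - (cote - 1); let l3 := n - 1
  let l4 := n + 1; let l5 := n + (cote - 1); let l6 := n + cote; let l7 := n + (cote + 1)
  let p := if PySem.Int.mod n cote = 0 then (l0 + cote, l3 + cote, l5 + cote) else (l0, l3, l5)
  let q := if PySem.Int.mod (n + 1) cote = 0 then (l2 - cote, l4 - cote, l7 - cote) else (l2, l4, l7)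
  [p.1, l1, q.1, p.2.1, q.2.1, p.2.2, l6, q.2.2].map (pvWrapA nbindiv)

-- ===== PORT B =====
-- Source B's helper _wrap1: bring x back into [0, m) after a ±1 step
def pvWrap1 (x m : Int) : Int :=
  if x < 0 then x + m
  else if x ≥ m then x - m
  else x

def ls_idvois_ordre1_alt (n : Int) (cote : Int) (nblignes : Int) : List Int :=
  let row := PySem.Int.mod n cote
  let col := PySem.Int.floordiv n cote
  [((-1 : Int), (-1 : Int)), (-1, 0), (-1, 1), (0, -1), (0, 1), (1, -1), (1, 0), (1, 1)].foldl
    (fun acc p =>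
      acc ++ [pvWrap1 (col + p.1) nblignes * cote + pvWrap1 (row + p.2) cote]) []

-- ===== PRECONDITION & SPEC =====
-- Pre_ excludes cote ≤ 0 only: at cote = 0 both Pythons raise ZeroDivisionError, and for
-- negative cote A's border tests and patches (written for a positive column height) return
-- indices of no cell while B's per-axis wrap legitimately differs.
def Pre_ls_idvois_ordre1 (n : Int) (cote : Int) (nblignes : Int) : Prop := 1 ≤ cote
instance (n : Int) (cote : Int) (nblignes : Int) : Decidable (Pre_ls_idvois_ordre1 n cote nblignes) := by
  unfold Pre_ls_idvois_ordre1; infer_instance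

def pvWitness_ls_idvois_ordre1 : Int × Int × Int := (4, 3, 3)

def Spec_ls_idvois_ordre1 (n : Int) (cote : Int) (nblignes : Int) (out : List Int) : Prop := out = ls_idvois_ordre1_alt n cote nblignes
instance (n : Int) (cote : Int) (nblignes : Int) (out : List Int) : Decidable (Spec_ls_idvois_ordre1 n cote nblignes out) := by unfold Spec_ls_idvois_ordre1; infer_instance

-- ===== CLAIM (what is proved, stated in full; the proofs are below) =====
def Claim_equal_ls_idvois_ordre1 : Prop := ∀ (n : Int) (cote : Int) (nblignes : Int), Dom_ls_idvois_ordre1 n cote nblignes → Pre_ls_idvois_ordre1 n cote nblignes → Spec_ls_idvois_ordre1 n cote nblignes (ls_idvois_ordre1 n cote nblignes)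

-- ===== LEMMAS AND PROOFS =====

-- A's flat-index wrap of s*cote + r2 (0 ≤ r2 < cote) is B's column wrap of s, for every nbl
lemma pvWrapA_eq (cote nbl s r2 : Int) (hc : 0 < cote) (hr : 0 ≤ r2) (hr2 : r2 < cote) :
    pvWrapA (cote * nbl) (s * cote + r2) = pvWrap1 s nbl * cote + r2 := by
  unfold pvWrapA pvWrap1
  by_cases hs : s < 0
  · have h1 : s * cote + r2 < 0 := by nlinarith
    have h2 : ¬ (s * cote + r2 + cote * nbl ≥ cote * nbl) := by push Not; linarith
    rw [if_pos h1, if_neg h2, if_pos hs]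
    ring
  · push Not at hs
    have h1 : ¬ (s * cote + r2 < 0) := by push Not; nlinarith
    rw [if_neg h1, if_neg (show ¬ s < 0 by omega)]
    by_cases hs2 : s ≥ nbl
    · have h3 : s * cote + r2 ≥ cote * nbl := by nlinarith
      rw [if_pos h3, if_pos hs2]
      ring
    · have h3 : ¬ (s * cote + r2 ≥ cote * nbl) := by push Not; nlinarith
      rw [if_neg h3, if_neg hs2]

-- one element of A = one element of B, uniformly in the offsets
lemma pvElem (cote nbl q r dc dr : Int) (hc : 0 < cote) (hr : 0 ≤ r) (hr2 : r < cote)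
    (hdr : dr = -1 ∨ dr = 0 ∨ dr = 1) :
    pvWrapA (cote * nbl)
      (q * cote + r + dc * cote + dr
        + (if r = 0 ∧ dr = -1 then cote else 0)
        - (if r = cote - 1 ∧ dr = 1 then cote else 0))
    = pvWrap1 (q + dc) nbl * cote + pvWrap1 (r + dr) cote := by
  rcases hdr with rfl | rfl | rfl
  · -- dr = -1
    by_cases hr0 : r = 0
    · subst hr0
      rw [if_pos ⟨rfl, rfl⟩, if_neg (by omega),
          show pvWrap1 ((0 : Int) + -1) cote = cote - 1 by unfold pvWrap1; split_ifs <;> omega,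
          show q * cote + 0 + dc * cote + (-1) + cote - 0 = (q + dc) * cote + (cote - 1) by ring]
      exact pvWrapA_eq cote nbl (q + dc) (cote - 1) hc (by omega) (by omega)
    · rw [if_neg (by omega), if_neg (by omega),
          show pvWrap1 (r + -1) cote = r - 1 by unfold pvWrap1; split_ifs <;> omega,
          show q * cote + r + dc * cote + (-1) + 0 - 0 = (q + dc) * cote + (r - 1) by ring]
      exact pvWrapA_eq cote nbl (q + dc) (r - 1) hc (by omega) (by omega)
  · -- dr = 0
    rw [if_neg (by omega), if_neg (by omega),
        show pvWrap1 (r + 0) cote = r by unfold pvWrap1; split_ifs <;> omega,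
        show q * cote + r + dc * cote + 0 + 0 - 0 = (q + dc) * cote + r by ring]
    exact pvWrapA_eq cote nbl (q + dc) r hc (by omega) (by omega)
  · -- dr = 1
    by_cases hr1 : r = cote - 1
    · subst hr1
      rw [if_neg (by omega), if_pos ⟨rfl, rfl⟩,
          show pvWrap1 (cote - 1 + 1) cote = 0 by unfold pvWrap1; split_ifs <;> omega,
          show q * cote + (cote - 1) + dc * cote + 1 + 0 - cote = (q + dc) * cote + 0 by ring]
      exact pvWrapA_eq cote nbl (q + dc) 0 hc (by omega) (by omega)
    · rw [if_neg (by omega), if_neg (by omega),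
          show pvWrap1 (r + 1) cote = r + 1 by unfold pvWrap1; split_ifs <;> omega,
          show q * cote + r + dc * cote + 1 + 0 - 0 = (q + dc) * cote + (r + 1) by ring]
      exact pvWrapA_eq cote nbl (q + dc) (r + 1) hc (by omega) (by omega)

-- ===== VERDICT (by name: the statement is the Claim_ definition above) =====
theorem ls_idvois_ordre1_spec : Claim_equal_ls_idvois_ordre1 := by
  intro n cote nbl _ hpre
  have hc' : (0 : Int) < cote := by exact hpre
  unfold Spec_ls_idvois_ordre1 ls_idvois_ordre1 ls_idvois_ordre1_alt
  simp only [List.foldl, List.nil_append, List.cons_append]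
  set r := PySem.Int.mod n cote with hrdef
  set q := PySem.Int.floordiv n cote with hqdef
  have hr : 0 ≤ r := PySem.Int.mod_nonneg n hc'
  have hr2 : r < cote := PySem.Int.mod_lt n hc'
  have hnqr : q * cote + r = n := PySem.Int.floordiv_mul_add_mod n cote
  have hm2 : PySem.Int.mod (n + 1) cote = (r + 1) % cote := by
    rw [PySem.Int.mod_eq_emod_of_pos hc', show n + 1 = (r + 1) + q * cote by linarith,
        Int.add_mul_emod_self_right]
  by_cases h1 : r = 0 <;> by_cases h2 : r = cote - 1
  · -- r=0: True, r=cote-1: True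
    rw [if_pos h1]
    rw [if_pos (show PySem.Int.mod (n + 1) cote = 0 by rw [hm2, show r + 1 = cote by omega]; exact Int.emod_self)]
    simp only [List.map, List.cons.injEq, and_true]
    refine ⟨?_, ?_, ?_, ?_, ?_, ?_, ?_, ?_⟩
    · have e := pvElem cote nbl q r (-1) (-1) hc' hr hr2 (Or.inl rfl)
      rw [if_pos ⟨h1, rfl⟩, if_neg (by omega)] at e
      rw [show n - (cote + 1) + cote = q * cote + r + (-1) * cote + (-1) + cote - 0 by linarith]
      exact e
    · have e := pvElem cote nbl q r (-1) (0) hc' hr hr2 (Or.inr (Or.inl rfl))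
      rw [if_neg (by omega), if_neg (by omega)] at e
      rw [show n - cote = q * cote + r + (-1) * cote + (0) + 0 - 0 by linarith]
      exact e
    · have e := pvElem cote nbl q r (-1) (1) hc' hr hr2 (Or.inr (Or.inr rfl))
      rw [if_neg (by omega), if_pos ⟨h2, rfl⟩] at e
      rw [show n - (cote - 1) - cote = q * cote + r + (-1) * cote + (1) + 0 - cote by linarith]
      exact e
    · have e := pvElem cote nbl q r (0) (-1) hc' hr hr2 (Or.inl rfl)
      rw [if_pos ⟨h1, rfl⟩, if_neg (by omega)] at e
      rw [show n - 1 + cote = q * cote + r + (0) * cote + (-1) + cote - 0 by linarith]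
      exact e
    · have e := pvElem cote nbl q r (0) (1) hc' hr hr2 (Or.inr (Or.inr rfl))
      rw [if_neg (by omega), if_pos ⟨h2, rfl⟩] at e
      rw [show n + 1 - cote = q * cote + r + (0) * cote + (1) + 0 - cote by linarith]
      exact e
    · have e := pvElem cote nbl q r (1) (-1) hc' hr hr2 (Or.inl rfl)
      rw [if_pos ⟨h1, rfl⟩, if_neg (by omega)] at e
      rw [show n + (cote - 1) + cote = q * cote + r + (1) * cote + (-1) + cote - 0 by linarith]
      exact e
    · have e := pvElem cote nbl q r (1) (0) hc' hr hr2 (Or.inr (Or.inl rfl))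
      rw [if_neg (by omega), if_neg (by omega)] at e
      rw [show n + cote = q * cote + r + (1) * cote + (0) + 0 - 0 by linarith]
      exact e
    · have e := pvElem cote nbl q r (1) (1) hc' hr hr2 (Or.inr (Or.inr rfl))
      rw [if_neg (by omega), if_pos ⟨h2, rfl⟩] at e
      rw [show n + (cote + 1) - cote = q * cote + r + (1) * cote + (1) + 0 - cote by linarith]
      exact e
  · -- r=0: True, r=cote-1: False
    rw [if_pos h1]
    rw [if_neg (show ¬ PySem.Int.mod (n + 1) cote = 0 by rw [hm2, Int.emod_eq_of_lt (a := r + 1) (b := cote) (by omega) (by omega)]; omega)]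
    simp only [List.map, List.cons.injEq, and_true]
    refine ⟨?_, ?_, ?_, ?_, ?_, ?_, ?_, ?_⟩
    · have e := pvElem cote nbl q r (-1) (-1) hc' hr hr2 (Or.inl rfl)
      rw [if_pos ⟨h1, rfl⟩, if_neg (by omega)] at e
      rw [show n - (cote + 1) + cote = q * cote + r + (-1) * cote + (-1) + cote - 0 by linarith]
      exact e
    · have e := pvElem cote nbl q r (-1) (0) hc' hr hr2 (Or.inr (Or.inl rfl))
      rw [if_neg (by omega), if_neg (by omega)] at e
      rw [show n - cote = q * cote + r + (-1) * cote + (0) + 0 - 0 by linarith]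
      exact e
    · have e := pvElem cote nbl q r (-1) (1) hc' hr hr2 (Or.inr (Or.inr rfl))
      rw [if_neg (by omega), if_neg (by simp [h2])] at e
      rw [show n - (cote - 1) = q * cote + r + (-1) * cote + (1) + 0 - 0 by linarith]
      exact e
    · have e := pvElem cote nbl q r (0) (-1) hc' hr hr2 (Or.inl rfl)
      rw [if_pos ⟨h1, rfl⟩, if_neg (by omega)] at e
      rw [show n - 1 + cote = q * cote + r + (0) * cote + (-1) + cote - 0 by linarith]
      exact e
    · have e := pvElem cote nbl q r (0) (1) hc' hr hr2 (Or.inr (Or.inr rfl))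
      rw [if_neg (by omega), if_neg (by simp [h2])] at e
      rw [show n + 1 = q * cote + r + (0) * cote + (1) + 0 - 0 by linarith]
      exact e
    · have e := pvElem cote nbl q r (1) (-1) hc' hr hr2 (Or.inl rfl)
      rw [if_pos ⟨h1, rfl⟩, if_neg (by omega)] at e
      rw [show n + (cote - 1) + cote = q * cote + r + (1) * cote + (-1) + cote - 0 by linarith]
      exact e
    · have e := pvElem cote nbl q r (1) (0) hc' hr hr2 (Or.inr (Or.inl rfl))
      rw [if_neg (by omega), if_neg (by omega)] at e
      rw [show n + cote = q * cote + r + (1) * cote + (0) + 0 - 0 by linarith]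
      exact e
    · have e := pvElem cote nbl q r (1) (1) hc' hr hr2 (Or.inr (Or.inr rfl))
      rw [if_neg (by omega), if_neg (by simp [h2])] at e
      rw [show n + (cote + 1) = q * cote + r + (1) * cote + (1) + 0 - 0 by linarith]
      exact e
  · -- r=0: False, r=cote-1: True
    rw [if_neg h1]
    rw [if_pos (show PySem.Int.mod (n + 1) cote = 0 by rw [hm2, show r + 1 = cote by omega]; exact Int.emod_self)]
    simp only [List.map, List.cons.injEq, and_true]
    refine ⟨?_, ?_, ?_, ?_, ?_, ?_, ?_, ?_⟩
    · have e := pvElem cote nbl q r (-1) (-1) hc' hr hr2 (Or.inl rfl)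
      rw [if_neg (by simp [h1]), if_neg (by omega)] at e
      rw [show n - (cote + 1) = q * cote + r + (-1) * cote + (-1) + 0 - 0 by linarith]
      exact e
    · have e := pvElem cote nbl q r (-1) (0) hc' hr hr2 (Or.inr (Or.inl rfl))
      rw [if_neg (by omega), if_neg (by omega)] at e
      rw [show n - cote = q * cote + r + (-1) * cote + (0) + 0 - 0 by linarith]
      exact e
    · have e := pvElem cote nbl q r (-1) (1) hc' hr hr2 (Or.inr (Or.inr rfl))
      rw [if_neg (by omega), if_pos ⟨h2, rfl⟩] at e
      rw [show n - (cote - 1) - cote = q * cote + r + (-1) * cote + (1) + 0 - cote by linarith]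
      exact e
    · have e := pvElem cote nbl q r (0) (-1) hc' hr hr2 (Or.inl rfl)
      rw [if_neg (by simp [h1]), if_neg (by omega)] at e
      rw [show n - 1 = q * cote + r + (0) * cote + (-1) + 0 - 0 by linarith]
      exact e
    · have e := pvElem cote nbl q r (0) (1) hc' hr hr2 (Or.inr (Or.inr rfl))
      rw [if_neg (by omega), if_pos ⟨h2, rfl⟩] at e
      rw [show n + 1 - cote = q * cote + r + (0) * cote + (1) + 0 - cote by linarith]
      exact e
    · have e := pvElem cote nbl q r (1) (-1) hc' hr hr2 (Or.inl rfl)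
      rw [if_neg (by simp [h1]), if_neg (by omega)] at e
      rw [show n + (cote - 1) = q * cote + r + (1) * cote + (-1) + 0 - 0 by linarith]
      exact e
    · have e := pvElem cote nbl q r (1) (0) hc' hr hr2 (Or.inr (Or.inl rfl))
      rw [if_neg (by omega), if_neg (by omega)] at e
      rw [show n + cote = q * cote + r + (1) * cote + (0) + 0 - 0 by linarith]
      exact e
    · have e := pvElem cote nbl q r (1) (1) hc' hr hr2 (Or.inr (Or.inr rfl))
      rw [if_neg (by omega), if_pos ⟨h2, rfl⟩] at e
      rw [show n + (cote + 1) - cote = q * cote + r + (1) * cote + (1) + 0 - cote by linarith]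
      exact e
  · -- r=0: False, r=cote-1: False
    rw [if_neg h1]
    rw [if_neg (show ¬ PySem.Int.mod (n + 1) cote = 0 by rw [hm2, Int.emod_eq_of_lt (a := r + 1) (b := cote) (by omega) (by omega)]; omega)]
    simp only [List.map, List.cons.injEq, and_true]
    refine ⟨?_, ?_, ?_, ?_, ?_, ?_, ?_, ?_⟩
    · have e := pvElem cote nbl q r (-1) (-1) hc' hr hr2 (Or.inl rfl)
      rw [if_neg (by simp [h1]), if_neg (by omega)] at e
      rw [show n - (cote + 1) = q * cote + r + (-1) * cote + (-1) + 0 - 0 by linarith]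
      exact e
    · have e := pvElem cote nbl q r (-1) (0) hc' hr hr2 (Or.inr (Or.inl rfl))
      rw [if_neg (by omega), if_neg (by omega)] at e
      rw [show n - cote = q * cote + r + (-1) * cote + (0) + 0 - 0 by linarith]
      exact e
    · have e := pvElem cote nbl q r (-1) (1) hc' hr hr2 (Or.inr (Or.inr rfl))
      rw [if_neg (by omega), if_neg (by simp [h2])] at e
      rw [show n - (cote - 1) = q * cote + r + (-1) * cote + (1) + 0 - 0 by linarith]
      exact e
    · have e := pvElem cote nbl q r (0) (-1) hc' hr hr2 (Or.inl rfl)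
      rw [if_neg (by simp [h1]), if_neg (by omega)] at e
      rw [show n - 1 = q * cote + r + (0) * cote + (-1) + 0 - 0 by linarith]
      exact e
    · have e := pvElem cote nbl q r (0) (1) hc' hr hr2 (Or.inr (Or.inr rfl))
      rw [if_neg (by omega), if_neg (by simp [h2])] at e
      rw [show n + 1 = q * cote + r + (0) * cote + (1) + 0 - 0 by linarith]
      exact e
    · have e := pvElem cote nbl q r (1) (-1) hc' hr hr2 (Or.inl rfl)
      rw [if_neg (by simp [h1]), if_neg (by omega)] at e
      rw [show n + (cote - 1) = q * cote + r + (1) * cote + (-1) + 0 - 0 by linarith]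
      exact e
    · have e := pvElem cote nbl q r (1) (0) hc' hr hr2 (Or.inr (Or.inl rfl))
      rw [if_neg (by omega), if_neg (by omega)] at e
      rw [show n + cote = q * cote + r + (1) * cote + (0) + 0 - 0 by linarith]
      exact e
    · have e := pvElem cote nbl q r (1) (1) hc' hr hr2 (Or.inr (Or.inr rfl))
      rw [if_neg (by omega), if_neg (by simp [h2])] at e
      rw [show n + (cote + 1) = q * cote + r + (1) * cote + (1) + 0 - 0 by linarith]
      exact e
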